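-- pv_equiv track=rewrite | github.com/feuerfritas/ktstats | ktstats/ktstats.py | map_rerolls
-- ===== SOURCE A (Python) =====
-- def map_rerolls(value):
--     hits = list(value[0])
--     misses = [x for x in hits if x == 'Miss']
--     rerolls = list(value[1])
--     for miss in misses:
--         if len(rerolls) == 0:
--             break
--         reroll = rerolls.pop()
--         if reroll == 'Crit':
--             hits.remove('Miss')
--             hits.insert(0, 'Crit')
--             continue
--         if reroll == 'Success':
--             hits.remove('Miss')
--             hits = [x for x in hits if x == 'Crit'] + ['Success'] + [x for x in hits if x != 'Crit']
--             continue
--     return tuple(hits)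
-- ===== SOURCE B (Python) =====
-- def map_rerolls(value):
--     hits = list(value[0])
--     rerolls = list(value[1])
--     k = min(sum(1 for x in hits if x == 'Miss'), len(rerolls))
--     consumed = rerolls[len(rerolls) - k:]
--     c = consumed.count('Crit')
--     s = consumed.count('Success')
--     rem = c + s
--     kept = []
--     for x in hits:
--         if x == 'Miss' and rem > 0:
--             rem -= 1
--         else:
--             kept.append(x)
--     if s == 0:
--         return tuple(['Crit'] * c + kept)
--     return tuple(['Crit'] * (c + kept.count('Crit')) + ['Success'] * s
--                  + [x for x in kept if x != 'Crit'])
-- ===== Notes on version B (the rewrite author's own statement) =====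
-- stated objective: alternative
-- what changed: B replaces A's per-miss simulation (each consumed reroll does a remove/insert or a full three-pass reordering of hits) by counting 'Crit'/'Success' in the consumed tail of rerolls once and assembling the result in a single pass: a replicated crit block, a success block, and the kept hits with the first c+s misses dropped.
import Mathlib
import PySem

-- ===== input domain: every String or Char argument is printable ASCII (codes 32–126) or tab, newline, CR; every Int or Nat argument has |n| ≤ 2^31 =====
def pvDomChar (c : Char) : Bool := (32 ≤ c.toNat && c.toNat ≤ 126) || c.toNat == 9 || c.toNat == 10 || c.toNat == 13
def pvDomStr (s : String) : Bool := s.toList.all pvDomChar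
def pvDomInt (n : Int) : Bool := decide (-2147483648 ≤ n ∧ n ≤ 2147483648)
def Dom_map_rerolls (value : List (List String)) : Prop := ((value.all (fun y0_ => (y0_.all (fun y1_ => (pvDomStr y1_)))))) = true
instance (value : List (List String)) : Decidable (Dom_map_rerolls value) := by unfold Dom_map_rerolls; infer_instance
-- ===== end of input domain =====

-- B replaces A's per-miss simulation (repeated remove/insert/reordering passes over hits)
-- by counting the consumed rerolls once and assembling the result in a single pass.

-- ===== PORT A =====
-- hits.remove('Miss'): Python raises ValueError when no 'Miss' is present; on inputs
-- admitted by Pre_ that case is unreachable (the loop never removes more misses than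
-- it counted), so the fallback branch is never taken.
def pvRemoveMiss (hits : List String) : List String :=
  match PySem.List.remove? hits "Miss" with
  | some h => h
  | none => hits

-- the for-loop over `misses`, state (hits, rerolls); break when rerolls is empty
def pvLoopA : List String → List String → List String → List String
  | [], hits, _ => hits
  | _ :: rest, hits, rerolls =>
    if rerolls.length = 0 then hits
    else
      match PySem.List.pop? rerolls with
      | none => hits  -- unreachable: rerolls is nonempty
      | some (reroll, rerolls') =>
        if reroll = "Crit" then
          pvLoopA rest ("Crit" :: pvRemoveMiss hits) rerolls'
        else if reroll = "Success" then
          let h := pvRemoveMiss hits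
          pvLoopA rest (h.filter (fun x => x == "Crit") ++ ["Success"] ++
                        h.filter (fun x => !(x == "Crit"))) rerolls'
        else
          pvLoopA rest hits rerolls'

def map_rerolls (value : List (List String)) : List String :=
  match PySem.List.pyGet? value 0, PySem.List.pyGet? value 1 with
  | some hits, some rerolls =>
      pvLoopA (hits.filter (fun x => x == "Miss")) hits rerolls
  | _, _ => []  -- IndexError (len(value) < 2); excluded by Pre_

-- ===== PORT B =====
-- Source B's single keep-loop: drop the first `rem` occurrences of 'Miss'
def pvKeep : Nat → List String → List String
  | _, [] => []
  | rem, x :: xs =>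
      if x = "Miss" ∧ 0 < rem then pvKeep (rem - 1) xs else x :: pvKeep rem xs

def map_rerolls_alt (value : List (List String)) : List String :=
  match PySem.List.pyGet? value 0 with
  | none => []  -- IndexError (len(value) < 2); excluded by Pre_
  | some hits =>
    match PySem.List.pyGet? value 1 with
    | none => []
    | some rerolls =>
      let k := min (hits.countP (fun x => x == "Miss")) rerolls.length
      let consumed := rerolls.drop (rerolls.length - k)  -- rerolls[len(rerolls)-k:], nonneg index
      let c := consumed.count "Crit"
      let s := consumed.count "Success"
      let kept := pvKeep (c + s) hits
      if s = 0 then List.replicate c "Crit" ++ kept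
      else List.replicate (c + kept.count "Crit") "Crit" ++ List.replicate s "Success" ++
           kept.filter (fun x => !(x == "Crit"))

-- ===== PRECONDITION & SPEC =====
-- Pre_ excludes exactly the inputs where Python A raises IndexError: len(value) < 2.
def Pre_map_rerolls (value : List (List String)) : Prop := 2 ≤ value.length
instance (value : List (List String)) : Decidable (Pre_map_rerolls value) := by
  unfold Pre_map_rerolls; infer_instance

def pvWitness_map_rerolls : List (List String) := [["Miss", "Hit"], ["Crit"]]

def Spec_map_rerolls (value : List (List String)) (out : List String) : Prop := out = map_rerolls_alt value
instance (value : List (List String)) (out : List String) : Decidable (Spec_map_rerolls value out) := by unfold Spec_map_rerolls; infer_instance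

-- ===== CLAIM (what is proved, stated in full; the proofs are below) =====
def Claim_equal_map_rerolls : Prop := ∀ (value : List (List String)), Dom_map_rerolls value → Pre_map_rerolls value → Spec_map_rerolls value (map_rerolls value)

-- ===== LEMMAS AND PROOFS =====

-- proof-only: A's loop, re-expressed over the processing order of the consumed rerolls
def pvGo : List String → List String → List String
  | hits, [] => hits
  | hits, x :: xs =>
    if x = "Crit" then pvGo ("Crit" :: pvRemoveMiss hits) xs
    else if x = "Success" then
      let h := pvRemoveMiss hits
      pvGo (h.filter (fun y => y == "Crit") ++ ["Success"] ++ h.filter (fun y => !(y == "Crit"))) xs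
    else pvGo hits xs

-- proof-only: the closed form B computes
def pvClosed (hits : List String) (c s : Nat) : List String :=
  let kept := pvKeep (c + s) hits
  if s = 0 then List.replicate c "Crit" ++ kept
  else List.replicate (c + kept.count "Crit") "Crit" ++ List.replicate s "Success" ++
       kept.filter (fun x => !(x == "Crit"))

theorem pvRemoveMiss_cons_miss (xs : List String) :
    pvRemoveMiss ("Miss" :: xs) = xs := by
  simp [pvRemoveMiss]

theorem pvRemoveMiss_cons_ne (x : String) (xs : List String) (h : x ≠ "Miss") :
    pvRemoveMiss (x :: xs) = x :: pvRemoveMiss xs := by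
  unfold pvRemoveMiss
  rw [PySem.List.remove?_cons_of_ne xs h]
  cases PySem.List.remove? xs "Miss" <;> simp

theorem pvKeep_succ (n : Nat) (hits : List String) :
    pvKeep (n + 1) hits = pvKeep n (pvRemoveMiss hits) := by
  induction hits with
  | nil => simp [pvKeep, pvRemoveMiss, PySem.List.remove?]
  | cons x xs ih =>
    by_cases hx : x = "Miss"
    · subst hx
      rw [pvRemoveMiss_cons_miss]
      simp [pvKeep]
    · rw [pvRemoveMiss_cons_ne x xs hx]
      simp [pvKeep, hx, ih]

theorem pvKeep_count_crit (n : Nat) (hits : List String) :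
    (pvKeep n hits).count "Crit" = hits.count "Crit" := by
  induction hits generalizing n with
  | nil => simp [pvKeep]
  | cons x xs ih =>
    by_cases hx : x = "Miss" ∧ 0 < n
    · rw [pvKeep, if_pos hx]
      rw [ih]
      simp [hx.1]
    · rw [pvKeep, if_neg hx]
      simp [List.count_cons, ih]

theorem pvKeep_filter_ne_crit (n : Nat) (hits : List String) :
    (pvKeep n hits).filter (fun x => !(x == "Crit")) =
      pvKeep n (hits.filter (fun x => !(x == "Crit"))) := by
  induction hits generalizing n with
  | nil => simp [pvKeep]
  | cons x xs ih =>
    by_cases hx : x = "Miss" ∧ 0 < n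
    · obtain ⟨hx1, hx2⟩ := hx
      subst hx1
      rw [pvKeep, if_pos ⟨rfl, hx2⟩]
      have : (("Miss" : String) == "Crit") = false := by decide
      simp only [List.filter_cons, this, Bool.not_false, if_pos]
      rw [pvKeep, if_pos ⟨rfl, hx2⟩]
      exact ih _
    · rw [pvKeep, if_neg hx]
      by_cases hc : x = "Crit"
      · subst hc
        simp [ih]
      · have hb : (x == "Crit") = false := by simp [hc]
        simp only [List.filter_cons, hb, Bool.not_false, if_pos]
        rw [pvKeep]
        have : ¬ (x = "Miss" ∧ 0 < n) := hx
        rw [if_neg this, ih]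

theorem pvKeep_crit_block (n m : Nat) (rest : List String) :
    pvKeep n (List.replicate m "Crit" ++ "Success" :: rest) =
      List.replicate m "Crit" ++ "Success" :: pvKeep n rest := by
  induction m with
  | zero => simp [pvKeep]
  | succ m ih => simp [List.replicate_succ, pvKeep, ih]

theorem pvKeep_zero (hits : List String) : pvKeep 0 hits = hits := by
  induction hits with
  | nil => rfl
  | cons x xs ih => rw [pvKeep, if_neg (by simp)]; rw [ih]

theorem pvClosed_crit (hits : List String) (c s : Nat) :
    pvClosed ("Crit" :: pvRemoveMiss hits) c s = pvClosed hits (c + 1) s := by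
  have hkept : pvKeep (c + s) ("Crit" :: pvRemoveMiss hits) =
      "Crit" :: pvKeep (c + 1 + s) hits := by
    rw [pvKeep]
    rw [if_neg (by rintro ⟨h, -⟩; exact absurd h (by decide))]
    have : c + 1 + s = (c + s) + 1 := by omega
    rw [this, pvKeep_succ]
  unfold pvClosed
  rw [hkept]
  by_cases hs : s = 0
  · subst hs
    rw [if_pos rfl, if_pos rfl, List.replicate_succ']
    simp
  · rw [if_neg hs, if_neg hs]
    have h1 : (("Crit" : String) :: pvKeep (c + 1 + s) hits).count "Crit" =
        (pvKeep (c + 1 + s) hits).count "Crit" + 1 := by simp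
    rw [h1]
    have h2 : c + ((pvKeep (c + 1 + s) hits).count "Crit" + 1) =
        (c + 1 + (pvKeep (c + 1 + s) hits).count "Crit") := by omega
    rw [h2]
    simp

theorem pvClosed_success (hits : List String) (c s : Nat) :
    pvClosed (((pvRemoveMiss hits).filter (fun y => y == "Crit")) ++ ["Success"] ++
        ((pvRemoveMiss hits).filter (fun y => !(y == "Crit")))) c s =
      pvClosed hits c (s + 1) := by
  have hkl : pvKeep (c + (s + 1)) hits = pvKeep (c + s) (pvRemoveMiss hits) := by
    have : c + (s + 1) = (c + s) + 1 := by omega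
    rw [this, pvKeep_succ]
  have hfilt : (pvRemoveMiss hits).filter (fun y => y == "Crit") =
      List.replicate ((pvRemoveMiss hits).count "Crit") "Crit" := List.filter_beq "Crit"
  have hkr : pvKeep (c + s)
        ((pvRemoveMiss hits).filter (fun y => y == "Crit") ++ ["Success"] ++
          (pvRemoveMiss hits).filter (fun y => !(y == "Crit"))) =
      List.replicate ((pvRemoveMiss hits).count "Crit") "Crit" ++ "Success" ::
        (pvKeep (c + s) (pvRemoveMiss hits)).filter (fun y => !(y == "Crit")) := by
    rw [hfilt]
    have : List.replicate ((pvRemoveMiss hits).count "Crit") "Crit" ++ ["Success"] ++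
        (pvRemoveMiss hits).filter (fun y => !(y == "Crit")) =
      List.replicate ((pvRemoveMiss hits).count "Crit") "Crit" ++ "Success" ::
        (pvRemoveMiss hits).filter (fun y => !(y == "Crit")) := by simp
    rw [this, pvKeep_crit_block, ← pvKeep_filter_ne_crit]
  have hcount_kept : (pvKeep (c + s) (pvRemoveMiss hits)).count "Crit" =
      (pvRemoveMiss hits).count "Crit" := pvKeep_count_crit _ _
  have e2 : ∀ (l : List String), (l.filter (fun y => !(y == "Crit"))).count "Crit" = 0 := by
    intro l
    rw [List.count_eq_zero]
    intro hmem
    have := List.of_mem_filter hmem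
    simp at this
  have e1 : ∀ (n : Nat), ((List.replicate n "Crit" : List String).count "Crit") = n := by
    intro n; simp
  have e3 : ∀ (n : Nat), (List.replicate n "Crit" : List String).filter
      (fun y => !(y == "Crit")) = [] := by
    intro n
    rw [List.filter_eq_nil_iff]
    intro a ha
    have := List.eq_of_mem_replicate ha
    subst this; decide
  have e4 : ∀ (l : List String), (l.filter (fun y => !(y == "Crit"))).filter
      (fun y => !(y == "Crit")) = l.filter (fun y => !(y == "Crit")) := by
    intro l; rw [List.filter_filter]; simp
  unfold pvClosed
  rw [hkl, hkr]
  by_cases hs : s = 0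
  · subst hs
    rw [if_neg (by omega : ¬ (0 + 1 = 0)), if_pos rfl]
    rw [hcount_kept, ← List.append_assoc, List.replicate_append_replicate]
    simp
  · rw [if_neg (by omega : ¬ (s + 1 = 0)), if_neg hs]
    rw [List.count_append, List.count_cons, e1, e2, hcount_kept]
    rw [List.filter_append, e3, List.filter_cons]
    rw [if_pos (by decide : (!(("Success" : String) == "Crit")) = true), e4]
    rw [List.replicate_succ' (n := s)]
    simp

theorem pvGo_closed (L : List String) (hits : List String) :
    pvGo hits L = pvClosed hits (L.count "Crit") (L.count "Success") := by
  induction L generalizing hits with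
  | nil => simp [pvGo, pvClosed, pvKeep_zero]
  | cons x xs ih =>
    by_cases hc : x = "Crit"
    · subst hc
      rw [pvGo, if_pos rfl, ih, pvClosed_crit]
      have h1 : (("Crit" : String) :: xs).count "Crit" = xs.count "Crit" + 1 := by
        simp
      have h2 : (("Crit" : String) :: xs).count "Success" = xs.count "Success" := by
        simp
      rw [h1, h2]
    · by_cases hsx : x = "Success"
      · subst hsx
        rw [pvGo, if_neg (by decide : ¬ (("Success" : String) = "Crit")), if_pos rfl, ih]
        rw [pvClosed_success]
        have h1 : (("Success" : String) :: xs).count "Crit" = xs.count "Crit" := by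
          simp
        have h2 : (("Success" : String) :: xs).count "Success" = xs.count "Success" + 1 := by
          simp
        rw [h1, h2]
      · rw [pvGo, if_neg hc, if_neg hsx, ih]
        have h1 : (x :: xs).count "Crit" = xs.count "Crit" := by
          simp [hc]
        have h2 : (x :: xs).count "Success" = xs.count "Success" := by
          simp [hsx]
        rw [h1, h2]

theorem pvLoopA_eq_go (misses : List String) (hits rerolls : List String) :
    pvLoopA misses hits rerolls = pvGo hits (rerolls.reverse.take misses.length) := by
  induction misses generalizing hits rerolls with
  | nil => simp [pvLoopA, pvGo]
  | cons m rest ih =>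
    rcases eq_or_ne rerolls [] with hr | hr
    · subst hr; simp [pvLoopA, pvGo]
    · obtain ⟨ys, y, rfl⟩ := (List.eq_nil_or_concat rerolls).resolve_left hr
      simp only [List.concat_eq_append]
      rw [pvLoopA]
      have hlen : ¬ ((ys ++ [y]).length = 0) := by simp
      rw [if_neg hlen, PySem.List.pop?_last]
      have hrev : (ys ++ [y]).reverse.take (m :: rest).length =
          y :: ys.reverse.take rest.length := by
        simp [List.take_succ_cons]
      dsimp only
      rw [hrev, pvGo]
      by_cases hc : y = "Crit"
      · rw [if_pos hc, if_pos hc, ih]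
      · rw [if_neg hc, if_neg hc]
        by_cases hsx : y = "Success"
        · rw [if_pos hsx, if_pos hsx, ih]
        · rw [if_neg hsx, if_neg hsx, ih]

-- the consumed slice of B counts the same rerolls A processes
theorem consumed_counts (rerolls : List String) (m : Nat) (v : String) :
    (rerolls.reverse.take m).count v =
      (rerolls.drop (rerolls.length - min m rerolls.length)).count v := by
  have hdrop : rerolls.length - min m rerolls.length = rerolls.length - m := by omega
  rw [hdrop, List.take_reverse, List.count_reverse]

theorem filter_miss_length (hits : List String) :
    (hits.filter (fun x => x == "Miss")).length = hits.countP (fun x => x == "Miss") :=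
  List.countP_eq_length_filter.symm

-- ===== VERDICT (by name: the statement is the Claim_ definition above) =====
theorem map_rerolls_spec : Claim_equal_map_rerolls := by
  intro value _ hpre
  unfold Pre_map_rerolls at hpre
  match value, hpre with
  | v0 :: v1 :: rest, _ =>
    unfold Spec_map_rerolls map_rerolls map_rerolls_alt
    have h0 : PySem.List.pyGet? (v0 :: v1 :: rest) 0 = some v0 :=
      PySem.List.pyGet?_zero_cons v0 (v1 :: rest)
    have h1 : PySem.List.pyGet? (v0 :: v1 :: rest) 1 = some v1 := by
      have := PySem.List.pyGet?_ofNat (xs := v0 :: v1 :: rest) (n := 1) (by simp)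
      simpa using this
    rw [h0, h1]
    dsimp only
    rw [pvLoopA_eq_go, pvGo_closed, filter_miss_length]
    rw [consumed_counts, consumed_counts]
    rfl
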